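-- pv_equiv track=rewrite | github.com/SukiEva/CheckEngine | src/check_engine/sql/executor.py | _split_leading_comments
-- ===== SOURCE A (Python) =====
-- def _split_leading_comments(sql: str) -> tuple[str, str]:
--     index = 0
--     length = len(sql)
--     while index < length:
--         if sql[index].isspace():
--             index += 1
--             continue
--         if sql.startswith("--", index):
--             line_end = sql.find("\n", index)
--             index = length if line_end == -1 else line_end + 1
--             continue
--         if sql.startswith("/*", index):
--             comment_end = sql.find("*/", index + 2)
--             if comment_end == -1:
--                 return sql, ""
--             index = comment_end + 2
--             continue
--         break
--     return sql[:index], sql[index:]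
-- ===== SOURCE B (Python) =====
-- def _split_leading_comments(sql: str) -> tuple[str, str]:
--     # Suffix-peeling: repeatedly lstrip whitespace and cut off one leading
--     # comment with str.partition, instead of scanning by index arithmetic.
--     rest = sql
--     while True:
--         t = rest.lstrip()
--         if t.startswith("--"):
--             rest = t.partition("\n")[2]
--         elif t.startswith("/*"):
--             _, sep, after = t[2:].partition("*/")
--             if not sep:
--                 return sql, ""
--             rest = after
--         else:
--             k = len(sql) - len(t)
--             return sql[:k], sql[k:]
-- ===== Notes on version B (the rewrite author's own statement) =====
-- stated objective: idiomatic
-- what changed: Replaced A's index-arithmetic scan (manual index bookkeeping with find offsets) by an idiomatic suffix-peeling loop that repeatedly lstrip()s whitespace and cuts one leading comment off the remaining suffix with str.partition, recovering the split point from the final suffix length.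
import Mathlib
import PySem

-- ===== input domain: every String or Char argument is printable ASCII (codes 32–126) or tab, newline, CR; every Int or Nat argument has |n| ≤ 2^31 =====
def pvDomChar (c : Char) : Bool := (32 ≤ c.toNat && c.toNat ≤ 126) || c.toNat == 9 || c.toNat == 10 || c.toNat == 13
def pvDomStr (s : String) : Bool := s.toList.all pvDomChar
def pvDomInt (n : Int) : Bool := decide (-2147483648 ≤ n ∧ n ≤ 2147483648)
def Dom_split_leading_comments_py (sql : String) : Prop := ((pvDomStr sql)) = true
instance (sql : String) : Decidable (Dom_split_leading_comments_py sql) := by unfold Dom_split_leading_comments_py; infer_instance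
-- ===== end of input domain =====

-- B replaces A's index-arithmetic scan by an idiomatic suffix-peeling loop
-- (lstrip + partition on the remaining suffix); equal output on every input.


-- ===== PORT A =====
-- A's while-loop over an increasing index; fuel = length + 1 is enough because
-- every iteration strictly increases `index` (fuel only makes the loop total).
-- `none` = the early `return sql, ""` on an unterminated block comment.
-- Python's sql.startswith(p, index) with 0 ≤ index ≤ len is startswith on drop index;
-- toNat is exact where used: the find results there are ≥ 0.
def pvALoop : Nat → List Char → Nat → Option Nat
  | 0, _, index => some index
  | fuel + 1, cs, index =>
    if h : index < cs.length then
      if PySem.Chars.isspace cs[index] then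
        pvALoop fuel cs (index + 1)
      else if PySem.Chars.startswith (cs.drop index) ['-', '-'] then
        let lineEnd := PySem.Chars.findFrom cs ['\n'] (index : Int)
        pvALoop fuel cs (if lineEnd = -1 then cs.length else (lineEnd + 1).toNat)
      else if PySem.Chars.startswith (cs.drop index) ['/', '*'] then
        let commentEnd := PySem.Chars.findFrom cs ['*', '/'] ((index : Int) + 2)
        if commentEnd = -1 then none
        else pvALoop fuel cs (commentEnd.toNat + 2)
      else some index
    else some index

def split_leading_comments_py (sql : String) : String × String :=
  match pvALoop (sql.toList.length + 1) sql.toList 0 with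
  | none => (sql, "")
  | some index =>
      (String.ofList (PySem.Chars.slice sql.toList none (some (index : Int))),
       String.ofList (PySem.Chars.slice sql.toList (some (index : Int)) none))

-- ===== PORT B =====
-- exact port of str.partition(sep) for non-empty sep: split at first occurrence,
-- ('whole', '', '') when absent.
def pvPartition (s sep : List Char) : List Char × List Char × List Char :=
  let j := PySem.Chars.find s sep
  if j = -1 then (s, [], [])
  else (s.take j.toNat, sep, s.drop (j.toNat + sep.length))

-- B's while-loop over the remaining suffix; fuel = length + 1 is enough because
-- the suffix strictly shrinks each iteration. `none` = return sql, "".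
def pvBLoop : Nat → List Char → Option (List Char)
  | 0, _ => none
  | fuel + 1, rest =>
    let t := PySem.Chars.lstrip rest
    if PySem.Chars.startswith t ['-', '-'] then
      pvBLoop fuel (pvPartition t ['\n']).2.2
    else if PySem.Chars.startswith t ['/', '*'] then
      let p := pvPartition (t.drop 2) ['*', '/']
      if p.2.1 = [] then none
      else pvBLoop fuel p.2.2
    else some t

def split_leading_comments_py_alt (sql : String) : String × String :=
  match pvBLoop (sql.toList.length + 1) sql.toList with
  | none => (sql, "")
  | some t =>
      (String.ofList (PySem.Chars.slice sql.toList none (some ((sql.toList.length : Int) - (t.length : Int)))),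
       String.ofList (PySem.Chars.slice sql.toList (some ((sql.toList.length : Int) - (t.length : Int))) none))

-- ===== PRECONDITION & SPEC =====
def Spec_split_leading_comments_py (sql : String) (out : String × String) : Prop := out = split_leading_comments_py_alt sql
instance (sql : String) (out : String × String) : Decidable (Spec_split_leading_comments_py sql out) := by unfold Spec_split_leading_comments_py; infer_instance

-- ===== CLAIM (what is proved, stated in full; the proofs are below) =====
def Claim_equal_split_leading_comments_py : Prop := ∀ (sql : String), Dom_split_leading_comments_py sql → Spec_split_leading_comments_py sql (split_leading_comments_py sql)

-- ===== LEMMAS AND PROOFS =====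

lemma pvBLoop_cons_space (g : Nat) (c : Char) (xs : List Char)
    (hc : PySem.Chars.isspace c = true) :
    pvBLoop (g + 1) (c :: xs) = pvBLoop (g + 1) xs := by
  simp only [pvBLoop]
  rw [show PySem.Chars.lstrip (c :: xs) = PySem.Chars.lstrip xs from by
        simp [PySem.Chars.lstrip, hc]]

lemma pv_lstrip_of_head_not_space (cs : List Char) (index : Nat)
    (h : index < cs.length) (hc : PySem.Chars.isspace cs[index] = false) :
    PySem.Chars.lstrip (cs.drop index) = cs.drop index := by
  rw [List.drop_eq_getElem_cons h]
  simp [PySem.Chars.lstrip, hc, ← List.drop_eq_getElem_cons h]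

set_option maxRecDepth 4096 in
lemma pv_loop_eq (f : Nat) : ∀ (g index : Nat) (cs : List Char),
    index ≤ cs.length → cs.length - index < f → cs.length - index < g →
    (pvALoop f cs index = none ∧ pvBLoop g (cs.drop index) = none) ∨
    (∃ i, index ≤ i ∧ i ≤ cs.length ∧ pvALoop f cs index = some i ∧
          pvBLoop g (cs.drop index) = some (cs.drop i)) := by
  induction f with
  | zero => intro g index cs h hf hg; omega
  | succ f ih =>
    intro g index cs h hf hg
    obtain ⟨g, rfl⟩ : ∃ g', g = g' + 1 := ⟨g - 1, by omega⟩
    by_cases hlt : index < cs.length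
    · rcases hsp : PySem.Chars.isspace cs[index] with _ | _
      · -- first char is not whitespace: B's lstrip is the identity here
        have ht : PySem.Chars.lstrip (cs.drop index) = cs.drop index :=
          pv_lstrip_of_head_not_space cs index hlt hsp
        by_cases hdd : PySem.Chars.startswith (cs.drop index) ['-', '-'] = true
        · -- line comment
          have hFF := PySem.Chars.findFrom_natCast cs ['\n'] index h
          by_cases hj : PySem.Chars.find (cs.drop index) ['\n'] = -1
          · have hA : pvALoop (f + 1) cs index = pvALoop f cs cs.length := by
              simp [pvALoop, hlt, hsp, hdd, hFF, hj]
            have hB : pvBLoop (g + 1) (cs.drop index) = pvBLoop g [] := by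
              simp [pvBLoop, ht, hdd, pvPartition, hj]
            have := ih g cs.length cs (le_refl _) (by omega) (by omega)
            rw [List.drop_length] at this
            rw [hA, hB]
            rcases this with ⟨h1, h2⟩ | ⟨i, hi1, hi2, h1, h2⟩
            · exact Or.inl ⟨h1, h2⟩
            · exact Or.inr ⟨i, by omega, hi2, h1, h2⟩
          · have hj0 : 0 ≤ PySem.Chars.find (cs.drop index) ['\n'] := by
              have := PySem.Chars.neg_one_le_find (cs.drop index) ['\n']
              omega
            obtain ⟨jn, hjn⟩ : ∃ n : Nat, PySem.Chars.find (cs.drop index) ['\n'] = (n : Int) :=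
              ⟨_, (Int.toNat_of_nonneg hj0).symm⟩
            have hjlt : jn < (cs.drop index).length := by
              have := (PySem.Chars.find_spec (s := cs.drop index) (sub := ['\n']) hj0).1
              have hlen := this.length_le
              rw [hjn] at hlen
              simp [List.length_drop] at hlen ⊢
              omega
            rw [List.length_drop] at hjlt
            have hA : pvALoop (f + 1) cs index = pvALoop f cs (index + jn + 1) := by
              have hne : ((index : Int) + jn = -1) = False := by simp; omega
              have htn : ((index : Int) + jn + 1).toNat = index + jn + 1 := by omega
              simp [pvALoop, hlt, hsp, hdd, hFF, hjn, hne, htn]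
            have hB : pvBLoop (g + 1) (cs.drop index) = pvBLoop g (cs.drop (index + (jn + 1))) := by
              simp [pvBLoop, ht, hdd, pvPartition, hjn, List.drop_drop]
            rw [hA, hB, show index + (jn + 1) = index + jn + 1 from by omega]
            have := ih g (index + jn + 1) cs (by omega) (by omega) (by omega)
            rcases this with ⟨h1, h2⟩ | ⟨i, hi1, hi2, h1, h2⟩
            · exact Or.inl ⟨h1, h2⟩
            · exact Or.inr ⟨i, by omega, hi2, h1, h2⟩
        · by_cases hds : PySem.Chars.startswith (cs.drop index) ['/', '*'] = true
          · -- block comment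
            have h2le : index + 2 ≤ cs.length := by
              have := ((PySem.Chars.startswith_iff _ _).mp hds).length_le
              rw [List.length_drop] at this
              simp at this
              omega
            have hFF2 : PySem.Chars.findFrom cs ['*', '/'] ((index : Int) + 2) =
                if PySem.Chars.find (cs.drop (index + 2)) ['*', '/'] = -1 then -1
                else ((index + 2 : Nat) : Int) + PySem.Chars.find (cs.drop (index + 2)) ['*', '/'] := by
              rw [show ((index : Int) + 2) = ((index + 2 : Nat) : Int) from by push_cast; ring]
              exact PySem.Chars.findFrom_natCast cs ['*', '/'] (index + 2) h2le
            by_cases hj : PySem.Chars.find (cs.drop (index + 2)) ['*', '/'] = -1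
            · have hA : pvALoop (f + 1) cs index = none := by
                simp [pvALoop, hlt, hsp, hdd, hds, hFF2, hj]
              have hB : pvBLoop (g + 1) (cs.drop index) = none := by
                simp only [pvBLoop, ht, hdd, hds, if_true]
                simp only [pvPartition, List.drop_drop, hj]
                simp
              exact Or.inl ⟨hA, hB⟩
            · have hj0 : 0 ≤ PySem.Chars.find (cs.drop (index + 2)) ['*', '/'] := by
                have := PySem.Chars.neg_one_le_find (cs.drop (index + 2)) ['*', '/']
                omega
              obtain ⟨jn, hjn⟩ : ∃ n : Nat, PySem.Chars.find (cs.drop (index + 2)) ['*', '/'] = (n : Int) :=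
                ⟨_, (Int.toNat_of_nonneg hj0).symm⟩
              have hjlt : jn + 2 ≤ (cs.drop (index + 2)).length := by
                have := (PySem.Chars.find_spec (s := cs.drop (index + 2)) (sub := ['*', '/']) hj0).1
                have hlen := this.length_le
                rw [hjn] at hlen
                simp [List.length_drop] at hlen ⊢
                omega
              rw [List.length_drop] at hjlt
              have hA : pvALoop (f + 1) cs index = pvALoop f cs (index + 2 + jn + 2) := by
                simp only [pvALoop, hlt, hsp, hdd, hds, hFF2]
                simp only [if_true, Bool.false_eq_true, if_false]
                rw [if_neg hj, hjn, if_neg (by omega), dif_pos trivial,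
                  show ((((index + 2 : Nat) : Int)) + (jn : Int)).toNat + 2 = index + 2 + jn + 2 from by omega]
              have hB : pvBLoop (g + 1) (cs.drop index) = pvBLoop g (cs.drop (index + 2 + (jn + 2))) := by
                simp only [pvBLoop, ht, hdd, hds, if_true]
                simp only [pvPartition, List.drop_drop, hjn]
                have hne : ((jn : Int) = -1) = False := by simp
                simp [hne, Int.toNat_natCast]
              rw [hA, hB, show index + 2 + (jn + 2) = index + 2 + jn + 2 from by omega]
              have := ih g (index + 2 + jn + 2) cs (by omega) (by omega) (by omega)
              rcases this with ⟨h1, h2⟩ | ⟨i, hi1, hi2, h1, h2⟩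
              · exact Or.inl ⟨h1, h2⟩
              · exact Or.inr ⟨i, by omega, hi2, h1, h2⟩
          · -- plain SQL text starts here: both loops stop
            refine Or.inr ⟨index, le_refl _, h, ?_, ?_⟩
            · simp [pvALoop, hlt, hsp, hdd, hds]
            · simp [pvBLoop, ht, hdd, hds]
      · -- whitespace: A advances one char, B's lstrip absorbs it
        have hA : pvALoop (f + 1) cs index = pvALoop f cs (index + 1) := by
          simp [pvALoop, hlt, hsp]
        have hB : pvBLoop (g + 1) (cs.drop index) = pvBLoop (g + 1) (cs.drop (index + 1)) := by
          rw [List.drop_eq_getElem_cons hlt, pvBLoop_cons_space g cs[index] _ hsp]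
        rw [hA, hB]
        have := ih (g + 1) (index + 1) cs (by omega) (by omega) (by omega)
        rcases this with ⟨h1, h2⟩ | ⟨i, hi1, hi2, h1, h2⟩
        · exact Or.inl ⟨h1, h2⟩
        · exact Or.inr ⟨i, by omega, hi2, h1, h2⟩
    · -- index = length: A stops; B sees the empty suffix and stops
      have he : cs.drop index = [] := List.drop_eq_nil_of_le (by omega)
      refine Or.inr ⟨index, le_refl _, h, by simp [pvALoop, hlt], ?_⟩
      rw [he]
      simp [pvBLoop, PySem.Chars.lstrip, PySem.Chars.startswith]

-- ===== VERDICT (by name: the statement is the Claim_ definition above) =====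
theorem split_leading_comments_py_spec : Claim_equal_split_leading_comments_py := by
  intro sql _
  unfold Spec_split_leading_comments_py split_leading_comments_py split_leading_comments_py_alt
  have h := pv_loop_eq (sql.toList.length + 1) (sql.toList.length + 1) 0 sql.toList
    (Nat.zero_le _) (by omega) (by omega)
  simp only [List.drop_zero] at h
  rcases h with ⟨ha, hb⟩ | ⟨i, _, hil, ha, hb⟩
  · rw [ha, hb]
  · rw [ha, hb]
    have hlen : ((sql.toList.length : Int) - ((sql.toList.drop i).length : Int)) = (i : Int) := by
      rw [List.length_drop]; omega
    dsimp only
    rw [hlen]
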